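-- pv_equiv track=rewrite | github.com/muhammadheidari0/mdr-system | app/api/v1/routers/transmittal.py | _gregorian_to_jalali
-- ===== SOURCE A (Python) =====
-- def _gregorian_to_jalali(g_year: int, g_month: int, g_day: int) -> tuple[int, int, int]:
--     g_days_in_month = [31, 28, 31, 30, 31, 30, 31, 31, 30, 31, 30, 31]
--     j_days_in_month = [31, 31, 31, 31, 31, 31, 30, 30, 30, 30, 30, 29]
--     gy = g_year - 1600
--     gm = g_month - 1
--     gd = g_day - 1
--     g_day_no = 365 * gy + (gy + 3) // 4 - (gy + 99) // 100 + (gy + 399) // 400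
--     for idx in range(gm):
--         g_day_no += g_days_in_month[idx]
--     if gm > 1 and ((gy + 1600) % 4 == 0 and ((gy + 1600) % 100 != 0 or (gy + 1600) % 400 == 0)):
--         g_day_no += 1
--     g_day_no += gd
--     j_day_no = g_day_no - 79
--     j_np = j_day_no // 12053
--     j_day_no %= 12053
--     jy = 979 + 33 * j_np + 4 * (j_day_no // 1461)
--     j_day_no %= 1461
--     if j_day_no >= 366:
--         jy += (j_day_no - 1) // 365
--         j_day_no = (j_day_no - 1) % 365
--     jm = 0
--     while jm < 11 and j_day_no >= j_days_in_month[jm]: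
--         j_day_no -= j_days_in_month[jm]
--         jm += 1
--     return jy, jm + 1, j_day_no + 1
-- ===== SOURCE B (Python) =====
-- def _gregorian_to_jalali(g_year: int, g_month: int, g_day: int) -> tuple[int, int, int]:
--     g_days_in_month = [31, 28, 31, 30, 31, 30, 31, 31, 30, 31, 30, 31]
--     gy = g_year - 1600
--     g_day_no = (365 * gy + (gy + 3) // 4 - (gy + 99) // 100 + (gy + 399) // 400
--                 + sum(g_days_in_month[:g_month - 1]) + (g_day - 1))
--     if g_month > 2 and g_year % 4 == 0 and (g_year % 100 != 0 or g_year % 400 == 0):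
--         g_day_no += 1
--     j_day_no = g_day_no - 79
--     j_np, j_day_no = divmod(j_day_no, 12053)
--     jy = 979 + 33 * j_np + 4 * (j_day_no // 1461)
--     j_day_no %= 1461
--     if j_day_no >= 366:
--         jy += (j_day_no - 1) // 365
--         j_day_no = (j_day_no - 1) % 365
--     # six 31-day months then 30-day months: closed-form month/day split
--     if j_day_no < 186:
--         jm, day = divmod(j_day_no, 31)
--     else:
--         jm, day = divmod(j_day_no - 186, 30)
--         jm += 6
--     return jy, jm + 1, day + 1
-- ===== Notes on version B (the rewrite author's own statement) =====
-- stated objective: simpler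
-- what changed: The per-month indexing loop becomes a sum over a clamped list slice and the iterative while-loop month search is replaced by a closed-form divmod decomposition of the Jalali day-of-year (six 31-day months then 30-day months).
-- outside the precondition, e.g. on _gregorian_to_jalali(2024, 0, 10): A returns (1402, 10, 20), B returns (1403, 9, 19)
import Mathlib
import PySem

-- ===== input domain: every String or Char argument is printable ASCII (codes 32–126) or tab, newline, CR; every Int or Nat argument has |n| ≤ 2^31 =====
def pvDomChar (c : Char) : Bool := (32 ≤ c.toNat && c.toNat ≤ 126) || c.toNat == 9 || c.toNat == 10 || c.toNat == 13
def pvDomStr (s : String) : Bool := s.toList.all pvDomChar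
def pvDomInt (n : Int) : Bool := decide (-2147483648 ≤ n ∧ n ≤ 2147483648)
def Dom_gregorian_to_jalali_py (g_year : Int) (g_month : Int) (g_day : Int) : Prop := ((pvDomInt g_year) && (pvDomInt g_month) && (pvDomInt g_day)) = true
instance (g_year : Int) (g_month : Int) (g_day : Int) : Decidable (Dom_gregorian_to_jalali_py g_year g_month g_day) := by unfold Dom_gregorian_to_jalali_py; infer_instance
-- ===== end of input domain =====

-- B replaces A's two small loops (month summation, Jalali month search) by a slice sum and a
-- closed-form divmod decomposition; objective: simpler straight-line arithmetic, same values.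

-- ===== PORT A =====
-- the `while jm < 11 and j_day_no >= j_days_in_month[jm]` loop of A, structural on the month list
def jLoopA : List Int → Int → Int → Int × Int
  | [], jm, d => (jm, d)
  | m :: rest, jm, d =>
      if jm < 11 ∧ m ≤ d then jLoopA rest (jm + 1) (d - m) else (jm, d)

def gregorian_to_jalali_py (g_year : Int) (g_month : Int) (g_day : Int) : Int × Int × Int :=
  let g_days_in_month : List Int := [31, 28, 31, 30, 31, 30, 31, 31, 30, 31, 30, 31]
  let j_days_in_month : List Int := [31, 31, 31, 31, 31, 31, 30, 30, 30, 30, 30, 29]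
  let gy := g_year - 1600
  let gm := g_month - 1
  let gd := g_day - 1
  let g_day_no := 365 * gy + PySem.Int.floordiv (gy + 3) 4 - PySem.Int.floordiv (gy + 99) 100
      + PySem.Int.floordiv (gy + 399) 400
  -- for idx in range(gm): g_day_no += g_days_in_month[idx]
  -- pyGetD with default 0 is exact inside Pre_ (every idx < 12 there; Python raises IndexError
  -- for gm ≥ 13, which Pre_ excludes)
  let g_day_no := (PySem.List.pyRange 0 gm 1).foldl
      (fun acc idx => acc + PySem.List.pyGetD g_days_in_month idx 0) g_day_no
  let g_day_no := if 1 < gm ∧ (PySem.Int.mod (gy + 1600) 4 = 0 ∧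
      (PySem.Int.mod (gy + 1600) 100 ≠ 0 ∨ PySem.Int.mod (gy + 1600) 400 = 0))
    then g_day_no + 1 else g_day_no
  let g_day_no := g_day_no + gd
  let j_day_no := g_day_no - 79
  let j_np := PySem.Int.floordiv j_day_no 12053
  let j_day_no := PySem.Int.mod j_day_no 12053
  let jy := 979 + 33 * j_np + 4 * PySem.Int.floordiv j_day_no 1461
  let j_day_no := PySem.Int.mod j_day_no 1461
  let jy := if j_day_no ≥ 366 then jy + PySem.Int.floordiv (j_day_no - 1) 365 else jy
  let j_day_no := if j_day_no ≥ 366 then PySem.Int.mod (j_day_no - 1) 365 else j_day_no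
  let p := jLoopA j_days_in_month 0 j_day_no
  (jy, p.1 + 1, p.2 + 1)

-- ===== PORT B =====
def gregorian_to_jalali_py_alt (g_year : Int) (g_month : Int) (g_day : Int) : Int × Int × Int :=
  let g_days_in_month : List Int := [31, 28, 31, 30, 31, 30, 31, 31, 30, 31, 30, 31]
  let gy := g_year - 1600
  -- sum(g_days_in_month[:g_month - 1])  (Python slice: clamped)
  let g_day_no := 365 * gy + PySem.Int.floordiv (gy + 3) 4 - PySem.Int.floordiv (gy + 99) 100
      + PySem.Int.floordiv (gy + 399) 400
      + (PySem.List.slice g_days_in_month none (some (g_month - 1))).sum + (g_day - 1)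
  let g_day_no := if 2 < g_month ∧ PySem.Int.mod g_year 4 = 0 ∧
      (PySem.Int.mod g_year 100 ≠ 0 ∨ PySem.Int.mod g_year 400 = 0)
    then g_day_no + 1 else g_day_no
  let j_day_no := g_day_no - 79
  -- j_np, j_day_no = divmod(j_day_no, 12053)
  let j_np := PySem.Int.floordiv j_day_no 12053
  let j_day_no := PySem.Int.mod j_day_no 12053
  let jy := 979 + 33 * j_np + 4 * PySem.Int.floordiv j_day_no 1461
  let j_day_no := PySem.Int.mod j_day_no 1461
  let jy := if j_day_no ≥ 366 then jy + PySem.Int.floordiv (j_day_no - 1) 365 else jy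
  let j_day_no := if j_day_no ≥ 366 then PySem.Int.mod (j_day_no - 1) 365 else j_day_no
  -- closed-form month/day split: six 31-day months, then 30-day months
  let p := if j_day_no < 186
    then (PySem.Int.floordiv j_day_no 31, PySem.Int.mod j_day_no 31)
    else (6 + PySem.Int.floordiv (j_day_no - 186) 30, PySem.Int.mod (j_day_no - 186) 30)
  (jy, p.1 + 1, p.2 + 1)

-- ===== PRECONDITION & SPEC =====
-- Pre_ excludes g_month ≥ 14, where A raises IndexError, and the non-calendar months
-- g_month ∈ [-10, 0], where no caller would specify either behaviour: A sums no months there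
-- while B's Python slice counts from the year's end, two equally unspecified choices (see cites).
def Pre_gregorian_to_jalali_py (g_year : Int) (g_month : Int) (g_day : Int) : Prop :=
  (1 ≤ g_month ∧ g_month ≤ 13) ∨ g_month ≤ -11
instance (g_year : Int) (g_month : Int) (g_day : Int) : Decidable (Pre_gregorian_to_jalali_py g_year g_month g_day) := by unfold Pre_gregorian_to_jalali_py; infer_instance
def pvWitness_gregorian_to_jalali_py : Int × Int × Int := (2024, 5, 15)

def Spec_gregorian_to_jalali_py (g_year : Int) (g_month : Int) (g_day : Int) (out : Int × Int × Int) : Prop := out = gregorian_to_jalali_py_alt g_year g_month g_day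
instance (g_year : Int) (g_month : Int) (g_day : Int) (out : Int × Int × Int) : Decidable (Spec_gregorian_to_jalali_py g_year g_month g_day out) := by unfold Spec_gregorian_to_jalali_py; infer_instance

-- ===== CLAIM (what is proved, stated in full; the proofs are below) =====
def Claim_equal_gregorian_to_jalali_py : Prop := ∀ (g_year : Int) (g_month : Int) (g_day : Int), Dom_gregorian_to_jalali_py g_year g_month g_day → Pre_gregorian_to_jalali_py g_year g_month g_day → Spec_gregorian_to_jalali_py g_year g_month g_day (gregorian_to_jalali_py g_year g_month g_day)

-- ===== LEMMAS AND PROOFS =====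

lemma foldl_add_gen (f : Int → Int) : ∀ (l : List Int) (c : Int),
    l.foldl (fun a i => a + f i) c = c + (l.map f).sum := by
  intro l
  induction l with
  | nil => simp
  | cons x xs ih => intro c; simp [List.foldl, ih]; ring

set_option maxHeartbeats 1000000 in
lemma month_split (d : Int) (h0 : 0 ≤ d) (h1 : d ≤ 365) :
    jLoopA [31, 31, 31, 31, 31, 31, 30, 30, 30, 30, 30, 29] 0 d =
      (if d < 186
        then (PySem.Int.floordiv d 31, PySem.Int.mod d 31)
        else (6 + PySem.Int.floordiv (d - 186) 30, PySem.Int.mod (d - 186) 30)) := by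
  interval_cases d <;> decide

lemma sum_eq (m : Int) (hpre : (1 ≤ m ∧ m ≤ 13) ∨ m ≤ -11) :
    ((PySem.List.pyRange 0 (m - 1) 1).map
        (fun idx => PySem.List.pyGetD ([31, 28, 31, 30, 31, 30, 31, 31, 30, 31, 30, 31] : List Int) idx 0)).sum
      = (PySem.List.slice ([31, 28, 31, 30, 31, 30, 31, 31, 30, 31, 30, 31] : List Int)
          none (some (m - 1))).sum := by
  rcases hpre with ⟨h1, h2⟩ | h
  · interval_cases m <;> decide
  · rw [PySem.List.pyRange_one_eq_nil (by omega)]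
    rw [show m - 1 = -(((1 - m).toNat : Nat) : Int) by omega,
        PySem.List.slice_to_neg_natCast _ _ (by omega)]
    have hk : ([31, 28, 31, 30, 31, 30, 31, 31, 30, 31, 30, 31] : List Int).length - (1 - m).toNat = 0 := by
      simp only [List.length]; omega
    rw [hk]
    simp

lemma tail_eq (g : Int) :
    (let j_day_no := g - 79
     let j_np := PySem.Int.floordiv j_day_no 12053
     let j_day_no := PySem.Int.mod j_day_no 12053
     let jy := 979 + 33 * j_np + 4 * PySem.Int.floordiv j_day_no 1461
     let j_day_no := PySem.Int.mod j_day_no 1461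
     let jy := if j_day_no ≥ 366 then jy + PySem.Int.floordiv (j_day_no - 1) 365 else jy
     let j_day_no := if j_day_no ≥ 366 then PySem.Int.mod (j_day_no - 1) 365 else j_day_no
     let p := jLoopA [31, 31, 31, 31, 31, 31, 30, 30, 30, 30, 30, 29] 0 j_day_no
     ((jy, p.1 + 1, p.2 + 1) : Int × Int × Int)) =
    (let j_day_no := g - 79
     let j_np := PySem.Int.floordiv j_day_no 12053
     let j_day_no := PySem.Int.mod j_day_no 12053
     let jy := 979 + 33 * j_np + 4 * PySem.Int.floordiv j_day_no 1461
     let j_day_no := PySem.Int.mod j_day_no 1461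
     let jy := if j_day_no ≥ 366 then jy + PySem.Int.floordiv (j_day_no - 1) 365 else jy
     let j_day_no := if j_day_no ≥ 366 then PySem.Int.mod (j_day_no - 1) 365 else j_day_no
     let p := if j_day_no < 186
       then (PySem.Int.floordiv j_day_no 31, PySem.Int.mod j_day_no 31)
       else (6 + PySem.Int.floordiv (j_day_no - 186) 30, PySem.Int.mod (j_day_no - 186) 30)
     ((jy, p.1 + 1, p.2 + 1) : Int × Int × Int)) := by
  have h2 : PySem.Int.mod (PySem.Int.mod (g - 79) 12053) 1461
      = PySem.Int.mod (g - 79) 12053 % 1461 := PySem.Int.mod_eq_emod_of_pos (by norm_num)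
  have hb2 : 0 ≤ PySem.Int.mod (g - 79) 12053 % 1461 ∧
      PySem.Int.mod (g - 79) 12053 % 1461 < 1461 :=
    ⟨Int.emod_nonneg _ (by norm_num), Int.emod_lt_of_pos _ (by norm_num)⟩
  simp only [h2]
  by_cases h : PySem.Int.mod (g - 79) 12053 % 1461 ≥ 366
  · have h3 : PySem.Int.mod (PySem.Int.mod (g - 79) 12053 % 1461 - 1) 365
        = (PySem.Int.mod (g - 79) 12053 % 1461 - 1) % 365 :=
      PySem.Int.mod_eq_emod_of_pos (by norm_num)
    have hb3 : 0 ≤ (PySem.Int.mod (g - 79) 12053 % 1461 - 1) % 365 ∧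
        (PySem.Int.mod (g - 79) 12053 % 1461 - 1) % 365 < 365 :=
      ⟨Int.emod_nonneg _ (by norm_num), Int.emod_lt_of_pos _ (by norm_num)⟩
    simp only [if_pos h, h3]
    rw [month_split _ (by omega) (by omega)]
  · simp only [if_neg h]
    rw [month_split _ (by omega) (by omega)]

lemma gdn_eq (g_year g_month g_day : Int)
    (hpre : Pre_gregorian_to_jalali_py g_year g_month g_day) :
    ((if 1 < g_month - 1 ∧ (PySem.Int.mod (g_year - 1600 + 1600) 4 = 0 ∧
        (PySem.Int.mod (g_year - 1600 + 1600) 100 ≠ 0 ∨ PySem.Int.mod (g_year - 1600 + 1600) 400 = 0))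
      then (PySem.List.pyRange 0 (g_month - 1) 1).foldl
            (fun acc idx => acc + PySem.List.pyGetD ([31, 28, 31, 30, 31, 30, 31, 31, 30, 31, 30, 31] : List Int) idx 0)
            (365 * (g_year - 1600) + PySem.Int.floordiv (g_year - 1600 + 3) 4
              - PySem.Int.floordiv (g_year - 1600 + 99) 100 + PySem.Int.floordiv (g_year - 1600 + 399) 400) + 1
      else (PySem.List.pyRange 0 (g_month - 1) 1).foldl
            (fun acc idx => acc + PySem.List.pyGetD ([31, 28, 31, 30, 31, 30, 31, 31, 30, 31, 30, 31] : List Int) idx 0)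
            (365 * (g_year - 1600) + PySem.Int.floordiv (g_year - 1600 + 3) 4
              - PySem.Int.floordiv (g_year - 1600 + 99) 100 + PySem.Int.floordiv (g_year - 1600 + 399) 400))
      + (g_day - 1)) =
    (if 2 < g_month ∧ PySem.Int.mod g_year 4 = 0 ∧
        (PySem.Int.mod g_year 100 ≠ 0 ∨ PySem.Int.mod g_year 400 = 0)
      then 365 * (g_year - 1600) + PySem.Int.floordiv (g_year - 1600 + 3) 4
            - PySem.Int.floordiv (g_year - 1600 + 99) 100 + PySem.Int.floordiv (g_year - 1600 + 399) 400
            + (PySem.List.slice ([31, 28, 31, 30, 31, 30, 31, 31, 30, 31, 30, 31] : List Int)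
                none (some (g_month - 1))).sum + (g_day - 1) + 1
      else 365 * (g_year - 1600) + PySem.Int.floordiv (g_year - 1600 + 3) 4
            - PySem.Int.floordiv (g_year - 1600 + 99) 100 + PySem.Int.floordiv (g_year - 1600 + 399) 400
            + (PySem.List.slice ([31, 28, 31, 30, 31, 30, 31, 31, 30, 31, 30, 31] : List Int)
                none (some (g_month - 1))).sum + (g_day - 1)) := by
  have hy : g_year - 1600 + 1600 = g_year := by ring
  rw [hy, foldl_add_gen, sum_eq g_month hpre]
  have hc : (1 < g_month - 1 ∧ (PySem.Int.mod g_year 4 = 0 ∧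
      (PySem.Int.mod g_year 100 ≠ 0 ∨ PySem.Int.mod g_year 400 = 0))) ↔
      (2 < g_month ∧ PySem.Int.mod g_year 4 = 0 ∧
      (PySem.Int.mod g_year 100 ≠ 0 ∨ PySem.Int.mod g_year 400 = 0)) := by
    constructor <;> (rintro ⟨a, b⟩; exact ⟨by omega, b⟩)
  simp only [hc]
  split_ifs <;> ring

-- ===== VERDICT (by name: the statement is the Claim_ definition above) =====
theorem gregorian_to_jalali_py_spec : Claim_equal_gregorian_to_jalali_py := by
  intro g_year g_month g_day _ hpre
  unfold Spec_gregorian_to_jalali_py gregorian_to_jalali_py gregorian_to_jalali_py_alt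
  simp only
  rw [tail_eq]
  rw [gdn_eq g_year g_month g_day hpre]
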